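-- pv_equiv track=rewrite | github.com/Aman-627/LaterList | app.py | extract_spotify_track_id
-- ===== SOURCE A (Python) =====
-- def extract_spotify_track_id(input_text):
--     """Extract Spotify track ID from a URL/URI/raw ID string."""
--     if not input_text:
--         return None
--     text = input_text.strip()
--     # URI form: spotify:track:<id>
--     if text.lower().startswith('spotify:track:'):
--         return text.split(':')[-1]
--     # URL form: https://open.spotify.com/track/<id>?...
--     if 'open.spotify.com/track/' in text:
--         try:
--             after = text.split('open.spotify.com/track/', 1)[1]
--             track_id = after.split('?')[0].split('/')[0]
--             return track_id
--         except Exception: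
--             return None
--     # Likely a raw base62 id (22 chars typically)
--     if 16 <= len(text) <= 36 and all(c.isalnum() or c in ('-', '_') for c in text):
--         return text
--     return None
-- ===== SOURCE B (Python) =====
-- def extract_spotify_track_id(input_text):
--     """Extract Spotify track ID from a URL/URI/raw ID string."""
--     if not input_text:
--         return None
--     text = input_text.strip()
--     # URI form: everything after the last ':' (rfind instead of split-list)
--     if text.lower().startswith('spotify:track:'):
--         return text[text.rfind(':') + 1:]
--     # URL form: locate the marker once, then scan forward to the first '?' or '/'
--     marker = 'open.spotify.com/track/'
--     pos = text.find(marker)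
--     if pos != -1:
--         tid = []
--         for c in text[pos + len(marker):]:
--             if c in '?/':
--                 break
--             tid.append(c)
--         return ''.join(tid)
--     # Likely a raw base62 id (22 chars typically)
--     if 16 <= len(text) <= 36 and all(c.isalnum() or c in ('-', '_') for c in text):
--         return text
--     return None
-- ===== Notes on version B (the rewrite author's own statement) =====
-- stated objective: alternative
-- what changed: Replaces the split-into-lists parsing (split(':')[-1], split(marker,1)[1] and nested split('?')[0].split('/')[0] under try/except) by index arithmetic: rfind+slice for the URI form, and one find plus a single forward scan stopping at the first '?' or '/' for the URL form.
import Mathlib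
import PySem

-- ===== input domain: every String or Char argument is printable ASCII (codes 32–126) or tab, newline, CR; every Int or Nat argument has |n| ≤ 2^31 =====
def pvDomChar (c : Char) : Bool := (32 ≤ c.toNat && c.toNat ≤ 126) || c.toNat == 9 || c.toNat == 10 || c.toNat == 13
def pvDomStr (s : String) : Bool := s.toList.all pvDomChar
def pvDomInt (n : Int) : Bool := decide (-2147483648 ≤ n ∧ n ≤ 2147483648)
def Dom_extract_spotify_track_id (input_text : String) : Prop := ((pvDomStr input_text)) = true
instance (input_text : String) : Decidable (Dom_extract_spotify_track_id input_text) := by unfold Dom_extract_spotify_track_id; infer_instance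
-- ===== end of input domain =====

-- B replaces A's split-into-lists parsing by index arithmetic (rfind+slice; find plus one
-- forward scan stopping at the first '?' or '/'); same return value, no speed claim.

-- ===== PORT A =====
-- Python A's local variable `text` (= input_text.strip()) is inlined; the try/except around
-- the three indexings is the Option.bind chain (a none = IndexError becomes return None).
def extract_spotify_track_id (input_text : String) : Option String :=
  if input_text = "" then none
  else if PySem.Str.startswith (PySem.Str.lower (PySem.Str.strip input_text)) "spotify:track:" then
    -- text.split(':')[-1]  (sep ':' is non-empty, so split? is some)
    PySem.List.pyGet? ((PySem.Str.split? (PySem.Str.strip input_text) ":").getD []) (-1)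
  else if PySem.Str.isIn "open.spotify.com/track/" (PySem.Str.strip input_text) then
    (PySem.List.pyGet? ((PySem.Str.splitMax? (PySem.Str.strip input_text) "open.spotify.com/track/" 1).getD []) 1).bind
      (fun after =>
        (PySem.List.pyGet? ((PySem.Str.split? after "?").getD []) 0).bind
          (fun t1 => PySem.List.pyGet? ((PySem.Str.split? t1 "/").getD []) 0))
  else if 16 ≤ PySem.Str.len (PySem.Str.strip input_text) ∧ PySem.Str.len (PySem.Str.strip input_text) ≤ 36
          ∧ (PySem.Str.strip input_text).toList.all (fun c => PySem.Chars.isalnum c || c = '-' || c = '_') then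
    some (PySem.Str.strip input_text)
  else none

-- ===== PORT B =====
-- the for-loop of Source B that collects tid and breaks at the first '?' or '/'
def pvScanTid : List Char → List Char
  | [] => []
  | c :: rest => if c == '?' || c == '/' then [] else c :: pvScanTid rest

-- Python B's locals `text` (= input_text.strip()) and `pos` (= text.find(marker)) are inlined.
def extract_spotify_track_id_alt (input_text : String) : Option String :=
  if input_text = "" then none
  else if PySem.Str.startswith (PySem.Str.lower (PySem.Str.strip input_text)) "spotify:track:" then
    some (PySem.Str.slice (PySem.Str.strip input_text)
      (some (PySem.Str.rfind (PySem.Str.strip input_text) ":" + 1)) none)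
  else if PySem.Str.find (PySem.Str.strip input_text) "open.spotify.com/track/" ≠ -1 then
    some (String.ofList (pvScanTid
      (PySem.Str.slice (PySem.Str.strip input_text)
        (some (PySem.Str.find (PySem.Str.strip input_text) "open.spotify.com/track/"
               + PySem.Str.len "open.spotify.com/track/")) none).toList))
  else if 16 ≤ PySem.Str.len (PySem.Str.strip input_text) ∧ PySem.Str.len (PySem.Str.strip input_text) ≤ 36
          ∧ (PySem.Str.strip input_text).toList.all (fun c => PySem.Chars.isalnum c || c = '-' || c = '_') then
    some (PySem.Str.strip input_text)
  else none

-- ===== PRECONDITION & SPEC =====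
def Spec_extract_spotify_track_id (input_text : String) (out : Option String) : Prop := out = extract_spotify_track_id_alt input_text
instance (input_text : String) (out : Option String) : Decidable (Spec_extract_spotify_track_id input_text out) := by unfold Spec_extract_spotify_track_id; infer_instance

-- ===== CLAIM (what is proved, stated in full; the proofs are below) =====
def Claim_equal_extract_spotify_track_id : Prop := ∀ (input_text : String), Dom_extract_spotify_track_id input_text → Spec_extract_spotify_track_id input_text (extract_spotify_track_id input_text)

-- ===== LEMMAS AND PROOFS =====

-- the suffix of s after the last occurrence of c (= s itself if c does not occur)
def pvAfterLast (c : Char) (s : List Char) : List Char :=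
  (s.reverse.takeWhile (fun x => x != c)).reverse

theorem pv_tw_append_of_mem {c : Char} {u : List Char} (v : List Char) (h : c ∈ u) :
    (u ++ v).takeWhile (fun x => x != c) = u.takeWhile (fun x => x != c) := by
  induction u with
  | nil => cases h
  | cons a u ih =>
    by_cases ha : a = c
    · simp [List.takeWhile, ha]
    · have : c ∈ u := by cases h with | head => exact absurd rfl ha | tail _ h => exact h
      simp [ha, ih this]

theorem pv_tw_append_of_not_mem {c : Char} {u : List Char} (v : List Char) (h : c ∉ u) :
    (u ++ v).takeWhile (fun x => x != c) = u ++ v.takeWhile (fun x => x != c) := by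
  induction u with
  | nil => simp
  | cons a u ih =>
    have ha : a ≠ c := fun e => h (e ▸ List.mem_cons_self)
    simp [ha, ih (fun hm => h (List.mem_cons_of_mem _ hm))]

theorem pvAfterLast_of_not_mem {c : Char} {s : List Char} (h : c ∉ s) : pvAfterLast c s = s := by
  unfold pvAfterLast
  rw [List.takeWhile_eq_self_iff.mpr]
  · simp
  · intro x hx
    simp only [bne_iff_ne, ne_eq]
    exact fun e => h (e ▸ (List.mem_reverse.mp hx))

theorem pvAfterLast_cons_of_mem {c x : Char} {rest : List Char} (h : c ∈ rest) :
    pvAfterLast c (x :: rest) = pvAfterLast c rest := by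
  unfold pvAfterLast
  rw [show (x :: rest).reverse = rest.reverse ++ [x] by simp,
    pv_tw_append_of_mem _ (List.mem_reverse.mpr h)]

theorem pvAfterLast_cons_self_of_not_mem {c : Char} {rest : List Char} (h : c ∉ rest) :
    pvAfterLast c (c :: rest) = rest := by
  unfold pvAfterLast
  rw [show (c :: rest).reverse = rest.reverse ++ [c] by simp,
    pv_tw_append_of_not_mem _ (fun hm => h (List.mem_reverse.mp hm))]
  simp

theorem pvAfterLast_append {c : Char} {u v : List Char} (h : c ∉ v) :
    pvAfterLast c (u ++ c :: v) = v := by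
  unfold pvAfterLast
  rw [show (u ++ c :: v).reverse = v.reverse ++ c :: u.reverse by simp,
    pv_tw_append_of_not_mem _ (fun hm => h (List.mem_reverse.mp hm))]
  simp

theorem pv_splitOn_go_acc (sep : List Char) (fuel : Nat) (l cur : List Char) (acc : List (List Char)) :
    PySem.Chars.splitOn.go sep fuel l cur acc = acc.reverse ++ PySem.Chars.splitOn.go sep fuel l cur [] := by
  induction fuel generalizing l cur acc with
  | zero => rw [PySem.Chars.splitOn.go, PySem.Chars.splitOn.go]; simp
  | succ f ih =>
    cases l with
    | nil =>
      rw [PySem.Chars.splitOn.go]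
      · rw [PySem.Chars.splitOn.go]
        · simp
        · omega
      · omega
    | cons c rest =>
      rw [PySem.Chars.splitOn.go]
      rw [show PySem.Chars.splitOn.go sep (f+1) (c::rest) cur [] =
        if sep.isPrefixOf (c::rest) then PySem.Chars.splitOn.go sep f (List.drop sep.length (c::rest)) [] [cur.reverse]
        else PySem.Chars.splitOn.go sep f rest (c :: cur) [] from by rw [PySem.Chars.splitOn.go]]
      by_cases hp : sep.isPrefixOf (c::rest)
      · simp only [hp, if_true]
        rw [ih _ _ (cur.reverse :: acc), ih _ _ [cur.reverse]]
        simp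
      · simp only [hp, if_false]
        exact ih _ _ acc

theorem pv_splitOn_go_head (c : Char) (fuel : Nat) (l cur : List Char) (h : l.length < fuel) :
    (PySem.Chars.splitOn.go [c] fuel l cur []).head? = some (cur.reverse ++ l.takeWhile (fun x => x != c)) := by
  induction fuel generalizing l cur with
  | zero => omega
  | succ f ih =>
    cases l with
    | nil =>
      rw [PySem.Chars.splitOn.go]
      · simp
      · omega
    | cons x rest =>
      rw [PySem.Chars.splitOn.go]
      by_cases hx : x = c
      · have hp : List.isPrefixOf [c] (x::rest) = true := by simp [List.isPrefixOf, hx]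
        simp only [hp, if_true]
        rw [pv_splitOn_go_acc]
        simp [List.takeWhile_cons, hx]
      · have hp : List.isPrefixOf [c] (x::rest) = false := by
          simp [List.isPrefixOf]; exact fun e => absurd e.symm hx
        simp only [hp, Bool.false_eq_true, if_false]
        rw [ih rest (x :: cur) (by simpa using Nat.lt_of_succ_lt_succ h)]
        have hxc : (x != c) = true := by simpa using hx
        simp [List.takeWhile_cons, hxc]

theorem pv_splitOn_go_last (c : Char) (fuel : Nat) (l cur : List Char) (acc : List (List Char)) (h : l.length < fuel) :
    (PySem.Chars.splitOn.go [c] fuel l cur acc).getLast? =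
      some (if c ∈ l then pvAfterLast c l else cur.reverse ++ l) := by
  induction fuel generalizing l cur acc with
  | zero => omega
  | succ f ih =>
    cases l with
    | nil =>
      rw [PySem.Chars.splitOn.go]
      · simp
      · omega
    | cons x rest =>
      rw [PySem.Chars.splitOn.go]
      by_cases hx : x = c
      · have hp : List.isPrefixOf [c] (x::rest) = true := by simp [List.isPrefixOf, hx]
        simp only [hp, if_true]
        rw [ih _ _ _ (by simpa using Nat.lt_of_succ_lt_succ h)]
        subst hx
        by_cases hm : x ∈ rest
        · simp [hm, pvAfterLast_cons_of_mem hm]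
        · simp [hm, pvAfterLast_cons_self_of_not_mem hm]
      · have hp : List.isPrefixOf [c] (x::rest) = false := by
          simp [List.isPrefixOf]; exact fun e => absurd e.symm hx
        simp only [hp, Bool.false_eq_true, if_false]
        rw [ih rest (x :: cur) acc (by simpa using Nat.lt_of_succ_lt_succ h)]
        by_cases hm : c ∈ rest
        · have : c ∈ x :: rest := List.mem_cons_of_mem _ hm
          simp [hm, this, pvAfterLast_cons_of_mem hm]
        · have hnm : c ∉ x :: rest := by
            intro hc; cases hc with | head => exact hx rfl | tail _ hc => exact hm hc
          simp [hm, hnm]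

theorem pv_splitOn_head (c : Char) (s : List Char) :
    (PySem.Chars.splitOn s [c]).head? = some (s.takeWhile (fun x => x != c)) := by
  unfold PySem.Chars.splitOn
  rw [pv_splitOn_go_head c (s.length+1) s [] (by omega)]
  simp

theorem pv_splitOn_last (c : Char) (s : List Char) :
    (PySem.Chars.splitOn s [c]).getLast? = some (pvAfterLast c s) := by
  unfold PySem.Chars.splitOn
  rw [pv_splitOn_go_last c (s.length+1) s [] [] (by omega)]
  by_cases hm : c ∈ s
  · simp [hm]
  · simp [hm, pvAfterLast_of_not_mem hm]

-- index of the first occurrence of sep in a list, as splitOn's loop sees it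
def pvFirstIdx (sep : List Char) : List Char → Option Nat
  | [] => if sep.isEmpty then some 0 else none
  | x :: rest => if sep.isPrefixOf (x :: rest) then some 0 else (pvFirstIdx sep rest).map (· + 1)

theorem pv_find_go_eq (sub : List Char) (l : List Char) (k : Nat) :
    PySem.Chars.find.go sub l k =
      match pvFirstIdx sub l with
      | some i => ((k + i : Nat) : Int)
      | none => -1 := by
  induction l generalizing k with
  | nil =>
    rw [PySem.Chars.find.go]
    unfold pvFirstIdx
    by_cases he : sub.isEmpty <;> simp [he]
  | cons x rest ih =>
    rw [PySem.Chars.find.go]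
    unfold pvFirstIdx
    by_cases hp : sub.isPrefixOf (x :: rest)
    · simp [hp]
    · simp only [hp, Bool.false_eq_true, if_false, ih (k+1)]
      cases pvFirstIdx sub rest with
      | none => simp
      | some i => simp only [Option.map_some]; push_cast; ring

theorem pv_find_eq (sub s : List Char) :
    PySem.Chars.find s sub = match pvFirstIdx sub s with
      | some i => (i : Int)
      | none => -1 := by
  unfold PySem.Chars.find
  rw [pv_find_go_eq]
  cases pvFirstIdx sub s <;> simp

theorem pv_splitOnMax_go_zero (sep : List Char) (fuel : Nat) (l cur : List Char) (acc : List (List Char)) :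
    PySem.Chars.splitOnMax.go sep fuel 0 l cur acc = ((cur.reverse ++ l) :: acc).reverse := by
  cases fuel with
  | zero => rw [PySem.Chars.splitOnMax.go]
  | succ f =>
    cases l with
    | nil =>
      rw [PySem.Chars.splitOnMax.go]
      · simp
      · omega
    | cons c r =>
      rw [PySem.Chars.splitOnMax.go]
      simp

theorem pv_splitOnMax_go_one (sep : List Char) (hsep : sep ≠ []) (fuel : Nat) (l cur : List Char)
    (acc : List (List Char)) (h : l.length < fuel) :
    PySem.Chars.splitOnMax.go sep fuel 1 l cur acc =
      match pvFirstIdx sep l with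
      | none => acc.reverse ++ [cur.reverse ++ l]
      | some i => acc.reverse ++ [cur.reverse ++ l.take i, l.drop (i + sep.length)] := by
  induction fuel generalizing l cur acc with
  | zero => omega
  | succ f ih =>
    cases l with
    | nil =>
      rw [PySem.Chars.splitOnMax.go]
      · unfold pvFirstIdx
        simp [List.isEmpty_iff, hsep]
      · omega
    | cons x rest =>
      rw [show PySem.Chars.splitOnMax.go sep (f+1) 1 (x::rest) cur acc =
        if sep.isPrefixOf (x::rest) then PySem.Chars.splitOnMax.go sep f 0 (List.drop sep.length (x::rest)) [] (cur.reverse :: acc)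
        else PySem.Chars.splitOnMax.go sep f 1 rest (x :: cur) acc from by
          rw [PySem.Chars.splitOnMax.go]; simp]
      unfold pvFirstIdx
      by_cases hp : sep.isPrefixOf (x::rest)
      · simp only [hp, if_true]
        rw [pv_splitOnMax_go_zero]
        simp
      · simp only [hp, Bool.false_eq_true, if_false]
        rw [ih rest (x :: cur) acc (by simpa using Nat.lt_of_succ_lt_succ h)]
        cases hfi : pvFirstIdx sep rest with
        | none => simp
        | some i =>
          simp only [Option.map_some]
          have h1 : (x :: rest).take (i+1) = x :: rest.take i := rfl
          have h2 : (x :: rest).drop (i + 1 + sep.length) = rest.drop (i + sep.length) := by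
            simp [List.drop_succ_cons, Nat.add_right_comm]
          simp [h1, h2, Nat.add_right_comm]

theorem pv_splitOnMax_one (sep : List Char) (hsep : sep ≠ []) (s : List Char) :
    PySem.Chars.splitOnMax s sep 1 =
      match pvFirstIdx sep s with
      | none => [s]
      | some i => [s.take i, s.drop (i + sep.length)] := by
  unfold PySem.Chars.splitOnMax
  norm_num
  rw [pv_splitOnMax_go_one sep hsep (s.length+1) s [] [] (by omega)]
  cases pvFirstIdx sep s <;> simp

theorem pv_prefix_single {c : Char} {l : List Char} (hp : List.isPrefixOf [c] l = true) :
    l = c :: l.tail := by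
  cases l with
  | nil => simp [List.isPrefixOf] at hp
  | cons x t =>
    simp [List.isPrefixOf] at hp
    simp [hp]

theorem pv_rfind_go (c : Char) (s : List Char) (j : Nat) (hj : j ≤ s.length)
    (hnm : c ∉ s.drop (j+1)) :
    -1 ≤ PySem.Chars.rfind.go s [c] j ∧
      s.drop ((PySem.Chars.rfind.go s [c] j) + 1).toNat = pvAfterLast c s := by
  induction j with
  | zero =>
    rw [PySem.Chars.rfind.go]
    by_cases hp : List.isPrefixOf [c] s
    · rw [if_pos hp]
      refine ⟨by norm_num, ?_⟩
      have hs := pv_prefix_single hp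
      have hnt : c ∉ s.tail := by
        intro hc
        exact hnm (by simpa using hc)
      conv_lhs => rw [hs]
      conv_rhs => rw [hs]
      simp [pvAfterLast_cons_self_of_not_mem hnt]
    · rw [if_neg hp]
      refine ⟨le_refl _, ?_⟩
      have hns : c ∉ s := by
        intro hc
        cases s with
        | nil => simp at hc
        | cons x t =>
          cases hc with
          | head => exact hp (by simp [List.isPrefixOf])
          | tail _ hc => exact hnm (by simpa using hc)
      simp [pvAfterLast_of_not_mem hns]
  | succ j ih =>
    rw [PySem.Chars.rfind.go]
    by_cases hp : List.isPrefixOf [c] (s.drop (j+1))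
    · rw [if_pos hp]
      refine ⟨by omega, ?_⟩
      have hd : s.drop (j+1) = c :: s.drop (j+2) := by
        have h1 := pv_prefix_single hp
        rw [List.tail_drop] at h1
        exact h1
      have hnm2 : c ∉ s.drop (j+2) := hnm
      have hsplit : s = s.take (j+1) ++ c :: s.drop (j+2) := by
        conv_lhs => rw [← List.take_append_drop (j+1) s, hd]
      have hAL : pvAfterLast c s = s.drop (j+2) := by
        conv_lhs => rw [hsplit]
        exact pvAfterLast_append hnm2
      have h2 : (((j+1:Nat):Int) + 1).toNat = j + 2 := by omega
      rw [h2, hAL]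
    · rw [if_neg hp]
      apply ih (by omega)
      cases hdd : s.drop (j+1) with
      | nil => simp
      | cons x t =>
        have hx : x ≠ c := by
          intro he; subst he
          exact hp (by rw [hdd]; simp [List.isPrefixOf])
        have ht : t = s.drop (j+2) := by
          have h3 := List.tail_drop (l := s) (i := j+1)
          rw [hdd] at h3
          simpa [show j+1+1 = j+2 from rfl] using h3
        intro hc
        cases hc with
        | head => exact hx rfl
        | tail _ hc => rw [ht] at hc; exact hnm hc

theorem pv_rfind' (c : Char) (s : List Char) :
    -1 ≤ PySem.Chars.rfind s [c] ∧
      s.drop ((PySem.Chars.rfind s [c]) + 1).toNat = pvAfterLast c s := by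
  unfold PySem.Chars.rfind
  exact pv_rfind_go c s s.length le_rfl (by rw [List.drop_eq_nil_of_le (by omega)]; simp)

theorem pvScanTid_eq (l : List Char) :
    pvScanTid l = (l.takeWhile (fun x => x != '?')).takeWhile (fun x => x != '/') := by
  induction l with
  | nil => rfl
  | cons c rest ih =>
    unfold pvScanTid
    by_cases hq : c = '?'
    · simp [hq, List.takeWhile_cons]
    · by_cases hs : c = '/'
      · simp [hs, List.takeWhile_cons]
      · simp [hq, hs, List.takeWhile_cons, ih]

-- the URI branch: text.split(':')[-1] = text[text.rfind(':') + 1:]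
theorem pv_branch1 (t : String) :
    PySem.List.pyGet? ((PySem.Str.split? t ":").getD []) (-1)
      = some (PySem.Str.slice t (some (PySem.Str.rfind t ":" + 1)) none) := by
  obtain ⟨hge, hdrop⟩ := pv_rfind' ':' t.toList
  have hsplit : PySem.Str.split? t ":" = some ((PySem.Chars.splitOn t.toList [':']).map String.ofList) := by
    simp [PySem.Str.split?, PySem.Chars.split?]
  rw [hsplit, Option.getD_some, PySem.List.pyGet?_neg_one, List.getLast?_map, pv_splitOn_last]
  have hslice : PySem.Str.slice t (some (PySem.Str.rfind t ":" + 1)) none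
      = String.ofList (t.toList.drop (PySem.Chars.rfind t.toList [':'] + 1).toNat) := by
    rw [show PySem.Str.rfind t ":" = PySem.Chars.rfind t.toList [':'] by simp]
    simp [PySem.Str.slice, PySem.List.slice_from _ (by omega : (0:Int) ≤ PySem.Chars.rfind t.toList [':'] + 1)]
  rw [hslice, hdrop]
  simp

theorem extract_spotify_track_id_spec : Claim_equal_extract_spotify_track_id := by
  intro input_text _
  unfold Spec_extract_spotify_track_id
  unfold extract_spotify_track_id extract_spotify_track_id_alt
  by_cases h0 : input_text = ""
  · rw [if_pos h0, if_pos h0]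
  · rw [if_neg h0, if_neg h0]
    generalize PySem.Str.strip input_text = t
    by_cases h1 : PySem.Str.startswith (PySem.Str.lower t) "spotify:track:" = true
    · rw [if_pos h1, if_pos h1]
      exact pv_branch1 t
    · rw [if_neg h1, if_neg h1]
      by_cases h2 : PySem.Str.isIn "open.spotify.com/track/" t = true
      · rw [if_pos h2]
        -- the marker occurs: get its first index i
        have hinf : "open.spotify.com/track/".toList <:+: t.toList :=
          (PySem.Str.isIn_iff_infix _ _).mp h2
        have hne : "open.spotify.com/track/".toList ≠ [] := by decide
        have hf : PySem.Chars.find t.toList "open.spotify.com/track/".toList ≠ -1 :=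
          (PySem.Chars.find_ne_neg_one_iff _ _).mpr hinf
        rw [pv_find_eq] at hf
        obtain ⟨i, hfi⟩ : ∃ i, pvFirstIdx "open.spotify.com/track/".toList t.toList = some i := by
          cases hfi : pvFirstIdx "open.spotify.com/track/".toList t.toList with
          | none => rw [hfi] at hf; simp at hf
          | some i => exact ⟨i, rfl⟩
        have hfind : PySem.Str.find t "open.spotify.com/track/" = (i : Int) := by
          rw [PySem.Str.find_eq, pv_find_eq, hfi]
        rw [if_pos (by rw [hfind]; omega)]
        -- A side: reduce the split chain
        have h23 : ("open.spotify.com/track/".toList.length) = 23 := rfl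
        have hsm : PySem.Str.splitMax? t "open.spotify.com/track/" 1
            = some ([t.toList.take i, t.toList.drop (i + 23)].map String.ofList) := by
          have hc : PySem.Chars.splitMax? t.toList "open.spotify.com/track/".toList 1
              = some [t.toList.take i, t.toList.drop (i + "open.spotify.com/track/".toList.length)] := by
            unfold PySem.Chars.splitMax?
            rw [if_neg (by simp [hne]), pv_splitOnMax_one _ hne, hfi]
          rw [h23] at hc
          unfold PySem.Str.splitMax?
          rw [hc, Option.map_some]
        rw [hsm, Option.getD_some]
        have hidx : PySem.List.pyGet?
            ([t.toList.take i, t.toList.drop (i + 23)].map String.ofList) 1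
            = some (String.ofList (t.toList.drop (i + 23))) := by
          simp [PySem.List.pyGet?, PySem.List.pyIdx?]
        rw [hidx, Option.bind_some]
        have hq : PySem.List.pyGet?
            ((PySem.Str.split? (String.ofList (t.toList.drop (i + 23))) "?").getD []) 0
            = some (String.ofList ((t.toList.drop (i + 23)).takeWhile (fun x => x != '?'))) := by
          have hsp : PySem.Str.split? (String.ofList (t.toList.drop (i + 23))) "?"
              = some ((PySem.Chars.splitOn (t.toList.drop (i + 23)) ['?']).map String.ofList) := by
            simp [PySem.Str.split?, PySem.Chars.split?]
          rw [hsp, Option.getD_some, PySem.List.pyGet?_zero, List.head?_eq_getElem?.symm, List.head?_map, pv_splitOn_head]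
          rfl
        rw [hq, Option.bind_some]
        have hs : PySem.List.pyGet?
            ((PySem.Str.split? (String.ofList ((t.toList.drop (i + 23)).takeWhile (fun x => x != '?'))) "/").getD []) 0
            = some (String.ofList (((t.toList.drop (i + 23)).takeWhile (fun x => x != '?')).takeWhile (fun x => x != '/'))) := by
          have hsp : PySem.Str.split? (String.ofList ((t.toList.drop (i + 23)).takeWhile (fun x => x != '?'))) "/"
              = some ((PySem.Chars.splitOn ((t.toList.drop (i + 23)).takeWhile (fun x => x != '?')) ['/']).map String.ofList) := by
            simp [PySem.Str.split?, PySem.Chars.split?]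
          rw [hsp, Option.getD_some, PySem.List.pyGet?_zero, List.head?_eq_getElem?.symm, List.head?_map, pv_splitOn_head]
          rfl
        rw [hs]
        -- B side
        have hslice : (PySem.Str.slice t
            (some (PySem.Str.find t "open.spotify.com/track/" + PySem.Str.len "open.spotify.com/track/")) none).toList
            = t.toList.drop (i + 23) := by
          rw [hfind, show PySem.Str.len "open.spotify.com/track/" = (23 : Int) from rfl]
          have htn : ((i : Int) + (23 : Int)).toNat = i + 23 := by omega
          simp [PySem.Str.slice, PySem.List.slice_from _ (by omega : (0:Int) ≤ (i:Int) + 23), htn]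
        rw [hslice, pvScanTid_eq]
      · rw [if_neg h2]
        have hpos : ¬ (PySem.Str.find t "open.spotify.com/track/" ≠ -1) := by
          intro hne
          exact h2 ((PySem.Str.isIn_iff_infix _ _).mpr
            ((PySem.Chars.find_ne_neg_one_iff _ _).mp (by rw [PySem.Str.find_eq] at hne; exact hne)))
        rw [if_neg hpos]
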